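-- pv_equiv track=rewrite | github.com/sstsimulator/sst-elements | src/sst/elements/merlin/topology/anytopo_utility/Polarfly.py | compute_index
-- ===== SOURCE A (Python) =====
-- def compute_index(coeffs, primePower, primeFactor):
--     assert(len(coeffs) == primePower)
--     cid = primePower-1
--     index = 0
--     while(cid >= 0):
--         index = index*primeFactor + coeffs[cid]
--         cid -= 1
--     return index
-- ===== SOURCE B (Python) =====
-- def compute_index(coeffs, primePower, primeFactor):
--     assert(len(coeffs) == primePower)
--     index = 0
--     power = 1
--     for c in coeffs:
--         index += c * power
--         power *= primeFactor
--     return index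
-- ===== Notes on version B (the rewrite author's own statement) =====
-- stated objective: simpler
-- what changed: Replaces the backward Horner while-loop with negative index arithmetic by a single forward pass over coeffs maintaining an explicit running power of primeFactor.
import Mathlib
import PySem

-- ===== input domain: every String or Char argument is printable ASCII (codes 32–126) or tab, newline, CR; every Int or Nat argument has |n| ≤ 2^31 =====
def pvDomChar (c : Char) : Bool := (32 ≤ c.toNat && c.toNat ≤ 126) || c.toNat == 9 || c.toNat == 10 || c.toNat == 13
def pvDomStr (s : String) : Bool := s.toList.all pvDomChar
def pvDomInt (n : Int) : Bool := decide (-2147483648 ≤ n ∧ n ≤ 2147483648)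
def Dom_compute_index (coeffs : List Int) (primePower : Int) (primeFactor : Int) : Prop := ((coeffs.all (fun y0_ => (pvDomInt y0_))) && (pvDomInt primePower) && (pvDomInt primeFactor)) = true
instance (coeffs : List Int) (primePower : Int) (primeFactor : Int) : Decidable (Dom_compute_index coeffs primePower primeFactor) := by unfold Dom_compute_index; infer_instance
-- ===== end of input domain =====

-- B replaces A's backward Horner while-loop by a forward pass with an explicit running power; objective: simpler.

-- ===== PORT A =====
-- fuel = number of remaining loop iterations (primePower.toNat at the start, one per cid decrement)
def computeIndexLoopA (coeffs : List Int) (primeFactor : Int) : Nat → Int → Int → Int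
  | 0, _, index => index
  | Nat.succ n, cid, index =>
      if cid ≥ 0 then
        computeIndexLoopA coeffs primeFactor n (cid - 1)
          (index * primeFactor + (PySem.List.pyGet? coeffs cid).getD 0)
      else index

def compute_index (coeffs : List Int) (primePower : Int) (primeFactor : Int) : Int :=
  computeIndexLoopA coeffs primeFactor primePower.toNat (primePower - 1) 0

-- ===== PORT B =====
def compute_index_alt (coeffs : List Int) (primePower : Int) (primeFactor : Int) : Int :=
  (coeffs.foldl (fun (st : Int × Int) c => (st.1 + c * st.2, st.2 * primeFactor)) (0, 1)).1

-- ===== PRECONDITION & SPEC =====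
-- A asserts len(coeffs) == primePower and raises AssertionError otherwise; Pre_ excludes exactly those inputs.
def Pre_compute_index (coeffs : List Int) (primePower : Int) (primeFactor : Int) : Prop :=
  (coeffs.length : Int) = primePower
instance (coeffs : List Int) (primePower : Int) (primeFactor : Int) : Decidable (Pre_compute_index coeffs primePower primeFactor) := by unfold Pre_compute_index; infer_instance

def pvWitness_compute_index : List Int × Int × Int := ([3, 1, 4], 3, 7)

def Spec_compute_index (coeffs : List Int) (primePower : Int) (primeFactor : Int) (out : Int) : Prop := out = compute_index_alt coeffs primePower primeFactor
instance (coeffs : List Int) (primePower : Int) (primeFactor : Int) (out : Int) : Decidable (Spec_compute_index coeffs primePower primeFactor out) := by unfold Spec_compute_index; infer_instance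

-- ===== CLAIM (what is proved, stated in full; the proofs are below) =====
def Claim_equal_compute_index : Prop := ∀ (coeffs : List Int) (primePower : Int) (primeFactor : Int), Dom_compute_index coeffs primePower primeFactor → Pre_compute_index coeffs primePower primeFactor → Spec_compute_index coeffs primePower primeFactor (compute_index coeffs primePower primeFactor)

-- ===== LEMMAS AND PROOFS =====
-- Reference value: Horner form, c0 + f*(c1 + f*(...)).
def hornerVal (f : Int) (xs : List Int) : Int := xs.foldr (fun c acc => acc * f + c) 0

theorem hornerVal_append_singleton (f : Int) (xs : List Int) (c : Int) :
    hornerVal f (xs ++ [c]) = hornerVal f xs + c * f ^ xs.length := by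
  induction xs with
  | nil => simp [hornerVal]
  | cons x xs ih =>
      simp only [hornerVal, List.cons_append, List.foldr_cons, List.length_cons] at *
      rw [ih]; ring

theorem loopA_eq (coeffs : List Int) (f : Int) :
    ∀ (k : Nat), k ≤ coeffs.length → ∀ (index : Int),
      computeIndexLoopA coeffs f k ((k : Int) - 1) index
        = index * f ^ k + hornerVal f (coeffs.take k) := by
  intro k
  induction k with
  | zero => intro _ index; simp [computeIndexLoopA, hornerVal]
  | succ n ih =>
      intro hk index
      have hn : n < coeffs.length := Nat.lt_of_succ_le hk
      have hget : (PySem.List.pyGet? coeffs ((n : Int) + 1 - 1)).getD 0 = coeffs[n] := by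
        have : ((n : Int) + 1 - 1) = (n : Int) := by ring
        rw [this, PySem.List.pyGet?_natCast, List.getElem?_eq_getElem hn]
        rfl
      have hcast : ((Nat.succ n : Nat) : Int) - 1 = (n : Int) + 1 - 1 := by push_cast; ring
      simp only [computeIndexLoopA, hcast]
      rw [if_pos (by omega)]
      have : (n : Int) + 1 - 1 - 1 = (n : Int) - 1 := by ring
      rw [this, hget, ih (Nat.le_of_lt hn)]
      have htake : coeffs.take (n + 1) = coeffs.take n ++ [coeffs[n]] := by
        rw [List.take_add_one, List.getElem?_eq_getElem hn]; rfl
      rw [htake, hornerVal_append_singleton]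
      have hlen : (coeffs.take n).length = n := List.length_take_of_le (Nat.le_of_lt hn)
      rw [hlen]; ring

theorem foldlB_eq (f : Int) :
    ∀ (xs : List Int) (index power : Int),
      (xs.foldl (fun (st : Int × Int) c => (st.1 + c * st.2, st.2 * f)) (index, power)).1
        = index + hornerVal f xs * power := by
  intro xs
  induction xs with
  | nil => intro index power; simp [hornerVal]
  | cons c cs ih =>
      intro index power
      simp only [List.foldl_cons, hornerVal, List.foldr_cons] at *
      rw [ih]; ring

-- ===== VERDICT (by name: the statement is the Claim_ definition above) =====
theorem compute_index_spec : Claim_equal_compute_index := by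
  intro coeffs primePower primeFactor _ hpre
  unfold Spec_compute_index compute_index compute_index_alt
  unfold Pre_compute_index at hpre
  have hpp : primePower.toNat = coeffs.length := by omega
  have hcast : primePower - 1 = ((coeffs.length : Int)) - 1 := by omega
  rw [hpp, hcast, loopA_eq coeffs primeFactor coeffs.length (le_refl _) 0,
      foldlB_eq primeFactor coeffs 0 1]
  simp
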